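-- pv_equiv track=rewrite | github.com/srikantharun/test-api | hw/ip/token_manager/default/scripts/hjson_print.py | irq_gen_en
-- ===== SOURCE A (Python) =====
-- import math
--
-- def str_conv(str):
--   return str.upper().replace("-","_")
--
-- def irq_gen_en(connections, clist, ctype="prod", pref=""):
--   lines=[]
--   otype="cons" if ctype=="prod" else "prod"
--   producer_consumer = "producer" if ctype=="prod" else "consumer"
--   # get amount of needed fields:
--   fields=0
--   for pr in clist:
--     res=list(filter(lambda d: d[ctype] in pr, connections))
--     fields+=(len(res))
--
--   idx=0
--   postfix=''
--   for pr in clist: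
--     res=list(filter(lambda d: d[ctype] in pr, connections))
--     for i, d in enumerate(res):
--       ridx=math.floor(idx/64)
--       if idx%64==0:
--         if fields>64:
--           postfix=f'_{ridx}'
--           # close previous register if not first one
--           if math.floor(idx/64) > 0:
--             lines.append(f'      ]\n')
--             lines.append(f'    }},\n')
--         lines.append(f'    {{ name: "{pref}IRQ_GEN_SAT_{str_conv(ctype)}_EN{postfix}",\n')
--         lines.append(f'      desc: \'\'\'\n\
--           Status of the interupt of the token manager for the generic {producer_consumer} counter.\n\
--           The bits are sticky and cleared when writing a 1 to that bit.\n\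
--           Note: bit will be set again when the irq condition (saturation) is still there.\n\
--           \'\'\',\n')
--         lines.append(f'      swaccess: "rw",\n')
--         lines.append(f'      hwaccess: "hro",\n')
--         lines.append(f'      fields: [\n')
--
--       lines.append(f'        {{\n')
--       lines.append(f'          bits: "{idx-ridx*64}"\n')
--       lines.append(f'          name: "IRQ_{str_conv(d[ctype])}_TOK_{str_conv(ctype)}_{str_conv(d[otype])}_EN"\n')
--       lines.append(f'          desc: "Enable the IRQ for {str_conv(d[ctype])}_TOK_{str_conv(ctype)}_{str_conv(d[otype])} saturation."\n')
--       lines.append(f'          resval: 0x0\n')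
--       lines.append(f'        }}\n')
--       idx+=1
--   lines.append(f'      ]\n')
--   lines.append(f'    }},\n')
--   return (lines, fields)
-- ===== SOURCE B (Python) =====
-- # B: precompute the flat ordered list of matching connections once, then emit
-- # register blocks chunk-by-chunk (64 fields per register) instead of A's two
-- # nested filter passes with an idx%64 split inside the emission loop.
--
-- def str_conv(str):
--   return str.upper().replace("-","_")
--
-- def irq_gen_en(connections, clist, ctype="prod", pref=""):
--   otype = "cons" if ctype == "prod" else "prod"
--   producer_consumer = "producer" if ctype == "prod" else "consumer"
--   items = [d for pr in clist for d in connections if d[ctype] in pr]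
--   fields = len(items)
--   lines = []
--   ridx = 0
--   rest = items
--   while rest:
--     chunk, rest = rest[:64], rest[64:]
--     if ridx > 0:
--       lines.append('      ]\n')
--       lines.append('    },\n')
--     postfix = f'_{ridx}' if fields > 64 else ''
--     lines.append(f'    {{ name: "{pref}IRQ_GEN_SAT_{str_conv(ctype)}_EN{postfix}",\n')
--     lines.append(f'      desc: \'\'\'\n\
--           Status of the interupt of the token manager for the generic {producer_consumer} counter.\n\
--           The bits are sticky and cleared when writing a 1 to that bit.\n\
--           Note: bit will be set again when the irq condition (saturation) is still there.\n\
--           \'\'\',\n')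
--     lines.append('      swaccess: "rw",\n')
--     lines.append('      hwaccess: "hro",\n')
--     lines.append('      fields: [\n')
--     for bit, d in enumerate(chunk):
--       lines.append('        {\n')
--       lines.append(f'          bits: "{bit}"\n')
--       lines.append(f'          name: "IRQ_{str_conv(d[ctype])}_TOK_{str_conv(ctype)}_{str_conv(d[otype])}_EN"\n')
--       lines.append(f'          desc: "Enable the IRQ for {str_conv(d[ctype])}_TOK_{str_conv(ctype)}_{str_conv(d[otype])} saturation."\n')
--       lines.append('          resval: 0x0\n')
--       lines.append('        }\n')
--     ridx += 1
--   lines.append('      ]\n')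
--   lines.append('    },\n')
--   return (lines, fields)
-- ===== Notes on version B (the rewrite author's own statement) =====
-- stated objective: alternative
-- what changed: B precomputes the flat ordered list of matching connections once (one comprehension) and then emits register blocks chunk-by-chunk with 64 fields per register, replacing A's two separate nested filter passes (one to count, one to emit) and the idx%64/floor-division register-split logic inside the emission loop.
import Mathlib
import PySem

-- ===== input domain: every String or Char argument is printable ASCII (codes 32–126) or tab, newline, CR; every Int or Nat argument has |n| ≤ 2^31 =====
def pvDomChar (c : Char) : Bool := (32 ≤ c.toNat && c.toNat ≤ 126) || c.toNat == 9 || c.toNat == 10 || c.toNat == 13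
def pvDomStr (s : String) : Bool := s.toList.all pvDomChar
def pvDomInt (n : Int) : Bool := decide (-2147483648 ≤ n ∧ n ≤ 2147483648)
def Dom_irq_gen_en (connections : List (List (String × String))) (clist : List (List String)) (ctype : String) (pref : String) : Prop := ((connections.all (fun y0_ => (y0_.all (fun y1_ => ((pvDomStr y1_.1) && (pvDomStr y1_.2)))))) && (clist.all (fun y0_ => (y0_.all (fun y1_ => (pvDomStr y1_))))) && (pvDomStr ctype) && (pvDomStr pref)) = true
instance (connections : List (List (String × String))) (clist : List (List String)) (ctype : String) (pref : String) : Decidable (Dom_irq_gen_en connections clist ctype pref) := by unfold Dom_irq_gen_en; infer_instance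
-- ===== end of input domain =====

-- B precomputes the flat ordered list of matching connections once and emits register
-- blocks chunk-by-chunk (64 fields per register), instead of A's two nested filter
-- passes with an idx%64 register split inside the emission loop (objective: alternative).

-- ===== PORT A =====
-- shared module helper str_conv, and shared f-string text (identical literals in Source A and Source B)
def str_conv (s : String) : String := PySem.Str.replace (PySem.Str.upper s) "-" "_"

-- d[k] for the dict d; KeyError (no match) is excluded by Pre_, "" is a dummy never used inside Pre_
def pvDget (d : List (String × String)) (k : String) : String :=
  ((d.find? (fun p => p.1 == k)).map (·.2)).getD ""

-- the final two lines '      ]\n', '    },\n'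
def pvCloser : List String := ["      ]\n", "    },\n"]

-- the five header lines of one register
def pvHeader (pref ctype pfx pc : String) : List String :=
  ["    { name: \"" ++ pref ++ "IRQ_GEN_SAT_" ++ str_conv ctype ++ "_EN" ++ pfx ++ "\",\n",
   "      desc: '''\n          Status of the interupt of the token manager for the generic " ++ pc ++ " counter.\n          The bits are sticky and cleared when writing a 1 to that bit.\n          Note: bit will be set again when the irq condition (saturation) is still there.\n          ''',\n",
   "      swaccess: \"rw\",\n",
   "      hwaccess: \"hro\",\n",
   "      fields: [\n"]

-- the six lines of one field
def pvField (ctype otype : String) (d : List (String × String)) (bits : Int) : List String :=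
  ["        {\n",
   "          bits: \"" ++ PySem.Int.toStr bits ++ "\"\n",
   "          name: \"IRQ_" ++ str_conv (pvDget d ctype) ++ "_TOK_" ++ str_conv ctype ++ "_" ++ str_conv (pvDget d otype) ++ "_EN\"\n",
   "          desc: \"Enable the IRQ for " ++ str_conv (pvDget d ctype) ++ "_TOK_" ++ str_conv ctype ++ "_" ++ str_conv (pvDget d otype) ++ " saturation.\"\n",
   "          resval: 0x0\n",
   "        }\n"]

-- res = list(filter(lambda d: d[ctype] in pr, connections))
def pvMatch (connections : List (List (String × String))) (ctype : String) (pr : List String) : List (List (String × String)) :=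
  connections.filter (fun d => pr.contains (pvDget d ctype))

-- the body of A's inner emission loop; state = (lines, idx, pfx)
def pvStepA (pref ctype otype pc : String) (fields : Int)
    (st : List String × Int × String) (d : List (String × String)) : List String × Int × String :=
  let lines := st.1
  let idx := st.2.1
  let pfx := st.2.2
  let ridx := PySem.Int.floordiv idx 64
  let (lines, pfx) :=
    if PySem.Int.mod idx 64 = 0 then
      let pfx := if fields > 64 then "_" ++ PySem.Int.toStr ridx else pfx
      let lines := if fields > 64 ∧ PySem.Int.floordiv idx 64 > 0 then lines ++ pvCloser else lines
      (lines ++ pvHeader pref ctype pfx pc, pfx)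
    else (lines, pfx)
  (lines ++ pvField ctype otype d (idx - ridx * 64), idx + 1, pfx)

def irq_gen_en (connections : List (List (String × String))) (clist : List (List String)) (ctype : String) (pref : String) : List String × Int :=
  let otype := if ctype = "prod" then "cons" else "prod"
  let pc := if ctype = "prod" then "producer" else "consumer"
  let fields : Int := clist.foldl (fun acc pr => acc + ((pvMatch connections ctype pr).length : Int)) 0
  let st := clist.foldl
    (fun (st : List String × Int × String) pr => (pvMatch connections ctype pr).foldl (pvStepA pref ctype otype pc fields) st)
    ([], 0, "")
  (st.1 ++ pvCloser, fields)

-- ===== PORT B =====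
-- the inner 'for bit, d in enumerate(chunk)' append loop
def pvFieldLinesB (ctype otype : String) (chunk : List (List (String × String))) : List String :=
  (PySem.List.enumerate chunk 0).foldl (fun lines q => lines ++ pvField ctype otype q.2 q.1) []

-- the 'while rest:' chunk loop of Source B (ridx counts emitted registers)
def pvEmitRegs (pref ctype otype pc : String) (fields : Int) (ridx : Nat) (rest : List (List (String × String))) : List String :=
  if rest = [] then []
  else
    (if ridx > 0 then pvCloser else []) ++
    pvHeader pref ctype (if fields > 64 then "_" ++ PySem.Int.toStr (ridx : Int) else "") pc ++
    pvFieldLinesB ctype otype (rest.take 64) ++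
    pvEmitRegs pref ctype otype pc fields (ridx + 1) (rest.drop 64)
termination_by rest.length
decreasing_by
  have h : rest.length ≠ 0 := by simpa [List.length_eq_zero_iff] using ‹¬ rest = []›
  simp [List.length_drop]; omega

def irq_gen_en_alt (connections : List (List (String × String))) (clist : List (List String)) (ctype : String) (pref : String) : List String × Int :=
  let otype := if ctype = "prod" then "cons" else "prod"
  let pc := if ctype = "prod" then "producer" else "consumer"
  let items := clist.flatMap (fun pr => pvMatch connections ctype pr)
  let fields : Int := (items.length : Int)
  (pvEmitRegs pref ctype otype pc fields 0 items ++ pvCloser, fields)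

-- ===== PRECONDITION & SPEC =====
-- Pre_ excludes exactly the inputs where Python A raises KeyError: when clist is nonempty
-- every connection dict must have the ctype key, and every dict selected for emission must
-- also have the otype key.
def Pre_irq_gen_en (connections : List (List (String × String))) (clist : List (List String)) (ctype : String) (pref : String) : Prop :=
  clist ≠ [] →
    ∀ d ∈ connections,
      (d.find? (fun p => p.1 == ctype)).isSome = true ∧
      ((∃ pr ∈ clist, (((d.find? (fun p => p.1 == ctype)).map (·.2)).getD "") ∈ pr) →
        (d.find? (fun p => p.1 == (if ctype = "prod" then "cons" else "prod"))).isSome = true)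
instance (connections : List (List (String × String))) (clist : List (List String)) (ctype : String) (pref : String) : Decidable (Pre_irq_gen_en connections clist ctype pref) := by unfold Pre_irq_gen_en; infer_instance

def pvWitness_irq_gen_en : (List (List (String × String))) × List (List String) × String × String :=
  ([[("prod", "a"), ("cons", "b")]], [["a"]], "prod", "")

def Spec_irq_gen_en (connections : List (List (String × String))) (clist : List (List String)) (ctype : String) (pref : String) (out : List String × Int) : Prop := out = irq_gen_en_alt connections clist ctype pref
instance (connections : List (List (String × String))) (clist : List (List String)) (ctype : String) (pref : String) (out : List String × Int) : Decidable (Spec_irq_gen_en connections clist ctype pref out) := by unfold Spec_irq_gen_en; infer_instance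

-- ===== CLAIM (what is proved, stated in full; the proofs are below) =====
def Claim_equal_irq_gen_en : Prop := ∀ (connections : List (List (String × String))) (clist : List (List String)) (ctype : String) (pref : String), Dom_irq_gen_en connections clist ctype pref → Pre_irq_gen_en connections clist ctype pref → Spec_irq_gen_en connections clist ctype pref (irq_gen_en connections clist ctype pref)

-- ===== LEMMAS AND PROOFS =====

theorem pv_witness_ok :
    Dom_irq_gen_en pvWitness_irq_gen_en.1 pvWitness_irq_gen_en.2.1 pvWitness_irq_gen_en.2.2.1 pvWitness_irq_gen_en.2.2.2 ∧
    Pre_irq_gen_en pvWitness_irq_gen_en.1 pvWitness_irq_gen_en.2.1 pvWitness_irq_gen_en.2.2.1 pvWitness_irq_gen_en.2.2.2 := by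
  constructor <;> decide

-- nested foldl over per-group lists = foldl over the flattened list
theorem pv_foldl_flatMap {α β σ : Type} (g : σ → β → σ) (f : α → List β) :
    ∀ (l : List α) (st : σ), l.foldl (fun st pr => (f pr).foldl g st) st = (l.flatMap f).foldl g st := by
  intro l
  induction l with
  | nil => intro st; rfl
  | cons pr tl ih => intro st; simp [List.flatMap_cons, List.foldl_append, ih]

-- A's field count = length of the flat item list
theorem pv_fields_eq (connections : List (List (String × String))) (ctype : String) :
    ∀ (clist : List (List String)) (acc : Int),
      clist.foldl (fun acc pr => acc + ((pvMatch connections ctype pr).length : Int)) acc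
        = acc + ((clist.flatMap (fun pr => pvMatch connections ctype pr)).length : Int) := by
  intro clist
  induction clist with
  | nil => intro acc; simp
  | cons pr tl ih => intro acc; simp [List.foldl_cons, ih]; ring

-- within a register (no 64-boundary hit): A's step loop just appends fields
theorem pv_chunk_tail (pref ctype otype pc : String) (F : Int) :
    ∀ (c : List (List (String × String))) (r j : Nat) (L : List String) (p : String),
      1 ≤ j → j + c.length ≤ 64 →
      c.foldl (pvStepA pref ctype otype pc F) (L, (64 * (r : Int) + (j : Int), p))
        = (L ++ (PySem.List.enumerate c (j : Int)).flatMap (fun q => pvField ctype otype q.2 q.1),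
           64 * (r : Int) + (j : Int) + (c.length : Int), p) := by
  intro c
  induction c with
  | nil => intro r j L p h1 h2; simp [PySem.List.enumerate_nil]
  | cons d tl ih =>
    intro r j L p h1 h2
    have hlt : j < 64 := by simp at h2; omega
    have hj0 : j ≠ 0 := by omega
    have hmod : PySem.Int.mod (64 * (r : Int) + (j : Int)) 64 ≠ 0 := by
      rw [PySem.Int.mod_eq_emod_of_pos (by norm_num : (0:Int) < 64)]
      omega
    have hdiv : PySem.Int.floordiv (64 * (r : Int) + (j : Int)) 64 = (r : Int) := by
      rw [PySem.Int.floordiv_eq_ediv_of_pos (by norm_num : (0:Int) < 64)]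
      omega
    rw [List.foldl_cons]
    have hstep : pvStepA pref ctype otype pc F (L, (64 * (r : Int) + (j : Int), p)) d
        = (L ++ pvField ctype otype d (j : Int), 64 * (r : Int) + ((j : Int) + 1), p) := by
      simp only [pvStepA]
      rw [if_neg hmod, hdiv]
      have harith : (64 * (r : Int) + (j : Int)) - (r : Int) * 64 = (j : Int) := by ring
      rw [harith]
      simp
      ring
    rw [hstep]
    have : (64 : Int) * (r : Int) + ((j : Int) + 1) = 64 * (r : Int) + ((j + 1 : Nat) : Int) := by push_cast; ring
    rw [this, ih r (j + 1) _ p (by omega) (by simp at h2 ⊢; omega)]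
    simp [PySem.List.enumerate_cons]
    ring

-- one full (or final partial) register chunk of A's loop
theorem pv_chunk (pref ctype otype pc : String) (F : Int) :
    ∀ (c : List (List (String × String))) (r : Nat) (L : List String) (p : String),
      c ≠ [] → c.length ≤ 64 → (F ≤ 64 → p = "") →
      c.foldl (pvStepA pref ctype otype pc F) (L, (64 * (r : Int), p))
        = (L ++ (if F > 64 ∧ r > 0 then pvCloser else [])
             ++ pvHeader pref ctype (if F > 64 then "_" ++ PySem.Int.toStr (r : Int) else "") pc
             ++ (PySem.List.enumerate c 0).flatMap (fun q => pvField ctype otype q.2 q.1),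
           64 * (r : Int) + (c.length : Int),
           if F > 64 then "_" ++ PySem.Int.toStr (r : Int) else p) := by
  intro c r L p hne hlen hp
  match c with
  | [] => exact absurd rfl hne
  | d :: tl =>
    have hmod : PySem.Int.mod (64 * (r : Int)) 64 = 0 := by
      rw [PySem.Int.mod_eq_emod_of_pos (by norm_num : (0:Int) < 64)]
      omega
    have hdiv : PySem.Int.floordiv (64 * (r : Int)) 64 = (r : Int) := by
      rw [PySem.Int.floordiv_eq_ediv_of_pos (by norm_num : (0:Int) < 64)]
      omega
    rw [List.foldl_cons]
    have hstep : pvStepA pref ctype otype pc F (L, (64 * (r : Int), p)) d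
        = (L ++ (if F > 64 ∧ r > 0 then pvCloser else [])
             ++ pvHeader pref ctype (if F > 64 then "_" ++ PySem.Int.toStr (r : Int) else "") pc
             ++ pvField ctype otype d 0,
           64 * (r : Int) + 1,
           if F > 64 then "_" ++ PySem.Int.toStr (r : Int) else p) := by
      simp only [pvStepA]
      rw [if_pos hmod, hdiv]
      have harith : (64 * (r : Int)) - (r : Int) * 64 = (0 : Int) := by ring
      rw [harith]
      by_cases hF : F > 64
      · by_cases hr0 : 0 < r
        · simp [hF, hr0, List.append_assoc]
        · simp [hF, hr0, List.append_assoc]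
      · have hF' : ¬ (F > 64 ∧ (r : Int) > 0) := by tauto
        simp [hp (by omega), hF]
    rw [hstep]
    have h1 : (64 : Int) * (r : Int) + 1 = 64 * (r : Int) + ((1 : Nat) : Int) := by norm_num
    rw [h1, pv_chunk_tail pref ctype otype pc F tl r 1 _ _ (by omega) (by simp at hlen ⊢; omega)]
    simp [PySem.List.enumerate_cons, List.append_assoc]
    omega

-- the whole emission loop of A equals B's chunk recursion
theorem pv_main (pref ctype otype pc : String) (F : Int) :
    ∀ (n : Nat) (c : List (List (String × String))) (r : Nat) (L : List String) (p : String),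
      c.length ≤ n →
      (F ≤ 64 → p = "") → (0 < r → 64 < F) → ((c.length : Int) ≤ F) →
      (c.foldl (pvStepA pref ctype otype pc F) (L, (64 * (r : Int), p))).1
        = L ++ pvEmitRegs pref ctype otype pc F r c := by
  intro n
  induction n with
  | zero =>
    intro c r L p hn _ _ _
    have : c = [] := by
      cases c with
      | nil => rfl
      | cons a b => simp at hn
    subst this
    simp [pvEmitRegs]
  | succ m ih =>
    intro c r L p hn hp hr hcF
    by_cases hce : c = []
    · subst hce; simp [pvEmitRegs]
    · rw [pvEmitRegs]
      simp only [hce]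
      by_cases hlen : c.length ≤ 64
      · -- single (final) chunk: drop 64 = []
        rw [pv_chunk pref ctype otype pc F c r L p hce hlen hp]
        have hdrop : c.drop 64 = [] := by
          rw [List.drop_eq_nil_iff]; omega
        have htake : c.take 64 = c := List.take_of_length_le hlen
        rw [hdrop, htake]
        have hclose : (if F > 64 ∧ r > 0 then pvCloser else []) = (if r > 0 then pvCloser else []) := by
          by_cases hr0 : r > 0
          · simp [hr0, hr hr0]
          · simp [hr0]
        rw [pvEmitRegs]
        simp [hclose, pvFieldLinesB, List.flatMap_def]
      · -- full chunk of 64, then recurse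
        have hsplit : c = c.take 64 ++ c.drop 64 := (List.take_append_drop 64 c).symm
        have htlen : (c.take 64).length = 64 := by
          rw [List.length_take]; omega
        have htne : c.take 64 ≠ [] := by
          intro h; rw [h] at htlen; simp at htlen
        conv_lhs => rw [hsplit]
        rw [List.foldl_append]
        rw [pv_chunk pref ctype otype pc F (c.take 64) r L p htne (by omega) hp]
        rw [htlen]
        have hidx : (64 : Int) * (r : Int) + ((64 : Nat) : Int) = 64 * ((r + 1 : Nat) : Int) := by push_cast; ring
        rw [hidx]
        have hF64 : 64 < F := by
          have : (c.length : Int) > 64 := by exact_mod_cast (by omega : c.length > 64)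
          omega
        rw [ih (c.drop 64) (r + 1) _ _ (by simp [List.length_drop]; omega)
              (fun h => absurd hF64 (by omega)) (fun _ => hF64)
              (by rw [List.length_drop]; omega)]
        simp [hF64, pvFieldLinesB, List.flatMap_def, List.append_assoc]

-- ===== VERDICT (by name: the statement is the Claim_ definition above) =====
theorem irq_gen_en_spec : Claim_equal_irq_gen_en := by
  intro connections clist ctype pref _ _
  unfold Spec_irq_gen_en irq_gen_en irq_gen_en_alt
  dsimp only
  have hflat := pv_foldl_flatMap
    (pvStepA pref ctype (if ctype = "prod" then "cons" else "prod") (if ctype = "prod" then "producer" else "consumer")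
      (clist.foldl (fun acc pr => acc + ((pvMatch connections ctype pr).length : Int)) 0))
    (fun pr => pvMatch connections ctype pr) clist (([], 0, "") : List String × Int × String)
  have hF := pv_fields_eq connections ctype clist 0
  simp only [zero_add] at hF
  rw [Prod.mk.injEq]
  constructor
  · rw [hflat, hF]
    have h0 : ((0 : Int), ("" : String)) = ((64 * ((0 : Nat) : Int), ("" : String)) : Int × String) := by norm_num
    rw [h0]
    rw [pv_main _ _ _ _ _ ((clist.flatMap (fun pr => pvMatch connections ctype pr)).length)
          (clist.flatMap (fun pr => pvMatch connections ctype pr)) 0 [] ""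
          (le_refl _) (fun _ => rfl) (by omega) (by simp)]
    simp
  · exact hF
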